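-- pv_equiv track=rewrite | github.com/seonjaechoi0307/TIL | Self-Study/Code_Test/School_Programers_Traning/2023-11-28.py | solution
-- ===== SOURCE A (Python) =====
-- def solution(str_list):
--
--     # 솔루션 정의
--     # 문자열 리스트 str_list에는 "u", "d", "l", "r" 네 개의 문자열이 여러 개 저장되어 있습니다.
--     # str_list에서 "l"과 "r" 중 먼저 나오는 문자열이 "l"이라면 해당 문자열을 기준으로 왼쪽에 있는 문자열들을 순서대로 담은 리스트를
--     # 먼저 나오는 문자열이 "r"이라면 해당 문자열을 기준으로 오른쪽에 있는 문자열들을 순서대로 담은 리스트를 return하도록 solution 함수를 완성해주세요.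
--     # "l"이나 "r"이 없다면 빈 리스트를 return합니다.
--
--     answer = []
--
--     if not str_list :
--         pass
--
--     else :
--
--         for i in range(len(str_list)) :
--
--             if str_list[i] == 'l' :
--                 return str_list[:i]
--
--             elif  str_list[i] == 'r' :
--                 return str_list[i+1:]
--
--     return answer
-- ===== SOURCE B (Python) =====
-- def solution(str_list):
--     li = str_list.index('l') if 'l' in str_list else None
--     ri = str_list.index('r') if 'r' in str_list else None
--     if li is None and ri is None:
--         return []
--     if ri is None or (li is not None and li < ri):
--         return str_list[:li]
--     return str_list[ri + 1:]
-- ===== Notes on version B (the rewrite author's own statement) =====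
-- stated objective: idiomatic
-- what changed: Replaces A's single early-exit index loop with two independent first-occurrence lookups (list.index guarded by membership) followed by a comparison of the two indices to pick the left or right slice.
import Mathlib
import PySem

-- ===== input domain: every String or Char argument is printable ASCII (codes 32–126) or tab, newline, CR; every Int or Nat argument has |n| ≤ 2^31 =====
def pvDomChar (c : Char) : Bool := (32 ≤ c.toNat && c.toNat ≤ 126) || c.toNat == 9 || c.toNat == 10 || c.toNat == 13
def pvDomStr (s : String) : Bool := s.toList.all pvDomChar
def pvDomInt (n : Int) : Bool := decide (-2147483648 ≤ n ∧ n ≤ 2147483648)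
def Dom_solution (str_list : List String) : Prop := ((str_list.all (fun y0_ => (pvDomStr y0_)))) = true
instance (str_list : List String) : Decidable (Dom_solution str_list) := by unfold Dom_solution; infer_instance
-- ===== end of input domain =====

-- B replaces A's single early-exit index loop by two independent first-occurrence
-- lookups followed by an index comparison (idiomatic decomposition; same cost).

-- ===== PORT A =====
-- the 'for i in range(len(str_list))' loop with its two early returns
-- (str_list[i] is always in range here, so pyGetD with an unused default is exact)
def solutionLoop (str_list : List String) : List Int → List String
  | [] => []
  | i :: rest =>
    if PySem.List.pyGetD str_list i "" = "l" then
      PySem.List.slice str_list none (some i)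
    else if PySem.List.pyGetD str_list i "" = "r" then
      PySem.List.slice str_list (some (i + 1)) none
    else
      solutionLoop str_list rest

def solution (str_list : List String) : List String :=
  if str_list = [] then []
  else solutionLoop str_list (PySem.List.pyRange 0 (str_list.length : Int) 1)

-- ===== PORT B =====
def solution_alt (str_list : List String) : List String :=
  let li : Option Nat := if "l" ∈ str_list then PySem.List.index? str_list "l" else none
  let ri : Option Nat := if "r" ∈ str_list then PySem.List.index? str_list "r" else none
  match li, ri with
  | none, none => []
  | some l, none => PySem.List.slice str_list none (some (l : Int))
  | none, some r => PySem.List.slice str_list (some ((r : Int) + 1)) none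
  | some l, some r =>
    if l < r then PySem.List.slice str_list none (some (l : Int))
    else PySem.List.slice str_list (some ((r : Int) + 1)) none

-- ===== PRECONDITION & SPEC =====
def Spec_solution (str_list : List String) (out : List String) : Prop := out = solution_alt str_list
instance (str_list : List String) (out : List String) : Decidable (Spec_solution str_list out) := by unfold Spec_solution; infer_instance

-- ===== CLAIM (what is proved, stated in full; the proofs are below) =====
def Claim_equal_solution : Prop := ∀ (str_list : List String), Dom_solution str_list → Spec_solution str_list (solution str_list)

-- ===== LEMMAS AND PROOFS =====

-- first 'l'-or-'r' scan: which of the two comes first, and where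
def scanLR : List String → Option (Bool × Nat)
  | [] => none
  | x :: t =>
    if x = "l" then some (true, 0)
    else if x = "r" then some (false, 0)
    else (scanLR t).map (fun p => (p.1, p.2 + 1))

def lrResult (xs : List String) : List String :=
  match scanLR xs with
  | none => []
  | some (true, k) => xs.take k
  | some (false, k) => xs.drop (k + 1)

lemma scan_index (xs : List String) :
    scanLR xs =
      (match PySem.List.index? xs "l", PySem.List.index? xs "r" with
        | none, none => none
        | some l, none => some (true, l)
        | none, some r => some (false, r)
        | some l, some r => if l < r then some (true, l) else some (false, r)) := by
  induction xs with
  | nil => simp [scanLR]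
  | cons x t ih =>
    by_cases hl : x = "l"
    · subst hl
      rw [scanLR, if_pos rfl, PySem.List.index?_cons_self,
        PySem.List.index?_cons_of_ne (x := "l") (v := "r") (xs := t) (by decide)]
      cases PySem.List.index? t "r" <;> simp
    · by_cases hr : x = "r"
      · subst hr
        rw [scanLR, if_neg (by decide), if_pos rfl, PySem.List.index?_cons_self,
          PySem.List.index?_cons_of_ne (x := "r") (v := "l") (xs := t) (by decide)]
        cases PySem.List.index? t "l" <;> simp
      · rw [scanLR, if_neg hl, if_neg hr, ih,
          PySem.List.index?_cons_of_ne (v := "l") (xs := t) hl,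
          PySem.List.index?_cons_of_ne (v := "r") (xs := t) hr]
        cases PySem.List.index? t "l" with
        | none => cases PySem.List.index? t "r" <;> simp
        | some l =>
          cases PySem.List.index? t "r" with
          | none => simp
          | some r =>
            simp only [Option.map_some]
            by_cases hlr : l < r
            · rw [if_pos hlr, if_pos (by omega : l + 1 < r + 1)]; simp
            · rw [if_neg hlr, if_neg (by omega : ¬ l + 1 < r + 1)]; simp

lemma loopA (xs : List String) (a : Nat) (ha : a ≤ xs.length) :
    solutionLoop xs (PySem.List.pyRange (a : Int) (xs.length : Int) 1) =
      match scanLR (xs.drop a) with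
      | none => []
      | some (true, k) => xs.take (a + k)
      | some (false, k) => xs.drop (a + k + 1) := by
  by_cases h : a < xs.length
  · rw [PySem.List.pyRange_one_cons (by exact_mod_cast h), solutionLoop]
    have hdrop : xs.drop a = xs[a] :: xs.drop (a + 1) := List.drop_eq_getElem_cons h
    have hget : PySem.List.pyGetD xs (a : Int) "" = xs[a] := by
      rw [PySem.List.pyGetD_natCast]; exact List.getD_eq_getElem xs "" h
    rw [hget, hdrop, scanLR]
    by_cases hl : xs[a] = "l"
    · rw [if_pos hl, if_pos hl, PySem.List.slice_to _ (by positivity)]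
      simp
    · rw [if_neg hl, if_neg hl]
      by_cases hr : xs[a] = "r"
      · rw [if_pos hr, if_pos hr, PySem.List.slice_from _ (by positivity)]
        have : ((a : Int) + 1).toNat = a + 1 := by omega
        simp [this]
      · rw [if_neg hr, if_neg hr]
        have : (a : Int) + 1 = ((a + 1 : Nat) : Int) := by push_cast; ring
        rw [this, loopA xs (a + 1) h]
        cases hs : scanLR (xs.drop (a + 1)) with
        | none => simp
        | some p =>
          obtain ⟨b, k⟩ := p
          cases b <;> simp <;> ring_nf
  · have : a = xs.length := by omega
    subst this
    rw [PySem.List.pyRange_one_eq_nil (by omega), solutionLoop]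
    simp [scanLR]
termination_by xs.length - a

lemma A_eq (xs : List String) : solution xs = lrResult xs := by
  unfold solution lrResult
  by_cases h : xs = []
  · subst h; simp [scanLR]
  · rw [if_neg h]
    have := loopA xs 0 (by omega)
    simpa using this

lemma B_eq (xs : List String) : solution_alt xs = lrResult xs := by
  unfold solution_alt lrResult
  rw [scan_index]
  have gl : (if "l" ∈ xs then PySem.List.index? xs "l" else none) = PySem.List.index? xs "l" := by
    by_cases h : "l" ∈ xs
    · rw [if_pos h]
    · rw [if_neg h, (PySem.List.index?_eq_none_iff xs "l").mpr h]
  have gr : (if "r" ∈ xs then PySem.List.index? xs "r" else none) = PySem.List.index? xs "r" := by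
    by_cases h : "r" ∈ xs
    · rw [if_pos h]
    · rw [if_neg h, (PySem.List.index?_eq_none_iff xs "r").mpr h]
  rw [gl, gr]
  cases PySem.List.index? xs "l" with
  | none =>
    cases PySem.List.index? xs "r" with
    | none => rfl
    | some r =>
      dsimp only
      rw [PySem.List.slice_from _ (by omega : (0:Int) ≤ (r:Int) + 1)]
      have : ((r : Int) + 1).toNat = r + 1 := by omega
      simp [this]
  | some l =>
    cases PySem.List.index? xs "r" with
    | none =>
      dsimp only
      rw [PySem.List.slice_to _ (by omega : (0:Int) ≤ (l:Int))]
      simp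
    | some r =>
      dsimp only
      by_cases hlr : l < r
      · rw [if_pos hlr, if_pos hlr, PySem.List.slice_to _ (by omega : (0:Int) ≤ (l:Int))]
        simp
      · rw [if_neg hlr, if_neg hlr, PySem.List.slice_from _ (by omega : (0:Int) ≤ (r:Int) + 1)]
        have : ((r : Int) + 1).toNat = r + 1 := by omega
        simp [this]

-- ===== VERDICT (by name: the statement is the Claim_ definition above) =====
theorem solution_spec : Claim_equal_solution := by
  intro xs _
  unfold Spec_solution
  rw [A_eq, B_eq]
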